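-- pv_equiv track=rewrite | github.com/Amateraisu/Competitive-programming_practice_set | CodeForces/Contest/933/dy.py | dfs
-- ===== SOURCE A (Python) =====
-- def dfs(n, m, throwNum, currentPlayer, throws, dp):
--     if dp[currentPlayer][throwNum] != -1:
--         # already visited here before
--         return 0
--     if throwNum == m:
--         dp[currentPlayer][m] = 1  # mark down who has the ball at the end
--         return 1
--     res = 0
--     distance = int(throws[throwNum][0])  # Convert char to int
--     first = (currentPlayer + distance) % n
--     second = (currentPlayer - distance + n) % n
--
--     if throws[throwNum][1] == '0':
--         # it goes clockwise
--         res += dfs(n, m, throwNum + 1, first, throws, dp)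
--     elif throws[throwNum][1] == '1':
--         # it goes anti clockwise
--         res += dfs(n, m, throwNum + 1, second, throws, dp)
--     else:
--         res += dfs(n, m, throwNum + 1, first, throws, dp)
--         res += dfs(n, m, throwNum + 1, second, throws, dp)
--
--     dp[currentPlayer][throwNum] = res
--     return res
-- ===== SOURCE B (Python) =====
-- def dfs(n, m, throwNum, currentPlayer, throws, dp):
--     if dp[currentPlayer][throwNum] != -1:
--         return 0
--     frontier = {currentPlayer}
--     for t in range(throwNum, m):
--         nxt = set()
--         for p in frontier:
--             if dp[p][t] != -1:
--                 continue
--             d = int(throws[t][0])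
--             kind = throws[t][1]
--             if kind != '1':
--                 nxt.add((p + d) % n)
--             if kind != '0':
--                 nxt.add((p - d + n) % n)
--         frontier = nxt
--     return sum(1 for p in frontier if dp[p][m] == -1)
-- ===== Notes on version B (the rewrite author's own statement) =====
-- stated objective: alternative
-- what changed: Replaces the memoized recursive DFS that mutates dp with a non-mutating level-by-level BFS: it sweeps t from throwNum to m keeping the set of players that can hold the ball at level t through dp-unvisited states, and counts the unvisited endpoints at level m.
-- outside the precondition, e.g. on dfs(2, 1, 0, -1, ['10'], [[-1, -1], [-1, -1]]): A returns 1, B returns 1; on dfs(3, 1, 0, 0, ['00'], [[-1, -1], [-1, -1]]): A returns 1, B returns 1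
import Mathlib
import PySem

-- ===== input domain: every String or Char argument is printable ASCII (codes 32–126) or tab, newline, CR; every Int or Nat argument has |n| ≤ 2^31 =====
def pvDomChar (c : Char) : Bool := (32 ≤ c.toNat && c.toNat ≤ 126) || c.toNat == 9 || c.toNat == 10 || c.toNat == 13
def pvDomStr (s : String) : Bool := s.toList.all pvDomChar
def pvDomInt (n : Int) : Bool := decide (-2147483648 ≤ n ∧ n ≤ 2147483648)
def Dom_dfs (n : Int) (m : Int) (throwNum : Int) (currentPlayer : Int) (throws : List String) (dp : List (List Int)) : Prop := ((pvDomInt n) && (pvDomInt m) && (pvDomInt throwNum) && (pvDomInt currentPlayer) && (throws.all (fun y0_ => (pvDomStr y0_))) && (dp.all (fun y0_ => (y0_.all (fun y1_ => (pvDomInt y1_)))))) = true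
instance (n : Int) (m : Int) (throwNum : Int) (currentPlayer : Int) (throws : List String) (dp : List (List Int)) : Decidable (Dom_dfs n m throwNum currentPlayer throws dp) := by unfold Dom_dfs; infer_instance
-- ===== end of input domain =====

-- B replaces A's memoized recursive DFS (which mutates dp in place) by a non-mutating
-- level-by-level BFS over the set of reachable players; the equivalence proved here is about
-- the RETURN value only (A mutates its dp argument, B does not).

-- shared Python primitives: dp[p][t] read and dp[p][t] = v write (two-level list indexing)
def pyGet2 (dp : List (List Int)) (p t : Int) : Option Int :=
  (PySem.List.pyGet? dp p).bind (fun row => PySem.List.pyGet? row t)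

def pySet2 (dp : List (List Int)) (p t v : Int) : List (List Int) :=
  match PySem.List.pyGet? dp p with
  | none => dp
  | some row => PySem.List.pySetD dp p (PySem.List.pySetD row t v)

-- ===== PORT A =====
-- fuel = (m - throwNum).toNat suffices: each recursive call increases throwNum by 1 towards m.
-- every 'none' / fuel-0 fallback below is a Python exception (IndexError/ValueError) or
-- unbounded recursion: those inputs are outside Pre_dfs.
def dfsAux (fuel : Nat) (n m tn cur : Int) (throws : List String) (dp : List (List Int)) : Int × List (List Int) :=
  match pyGet2 dp cur tn with
  | none => (0, dp)
  | some v =>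
    if v ≠ -1 then (0, dp)
    else if tn = m then (1, pySet2 dp cur m 1)
    else
      match fuel with
      | 0 => (0, dp)
      | fuel' + 1 =>
        match PySem.List.pyGet? throws tn with
        | none => (0, dp)
        | some s =>
          match PySem.Str.pyGet? s 0, PySem.Str.pyGet? s 1 with
          | some c0, some c1 =>
            match PySem.Int.ofStr? (String.ofList [c0]) with
            | none => (0, dp)
            | some d =>
              let first := PySem.Int.mod (cur + d) n
              let second := PySem.Int.mod (cur - d + n) n
              if c1 = '0' then
                let r := dfsAux fuel' n m (tn + 1) first throws dp
                (r.1, pySet2 r.2 cur tn r.1)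
              else if c1 = '1' then
                let r := dfsAux fuel' n m (tn + 1) second throws dp
                (r.1, pySet2 r.2 cur tn r.1)
              else
                let r1 := dfsAux fuel' n m (tn + 1) first throws dp
                let r2 := dfsAux fuel' n m (tn + 1) second throws r1.2
                (r1.1 + r2.1, pySet2 r2.2 cur tn (r1.1 + r2.1))
          | _, _ => (0, dp)

def dfs (n : Int) (m : Int) (throwNum : Int) (currentPlayer : Int) (throws : List String) (dp : List (List Int)) : Int :=
  (dfsAux (m - throwNum).toNat n m throwNum currentPlayer throws dp).1

-- ===== PORT B =====
-- literal transliteration of Source B: a BFS frontier set swept over levels throwNum..m-1,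
-- then a count of the dp-unvisited players of the final frontier.
def dfs_alt (n : Int) (m : Int) (throwNum : Int) (currentPlayer : Int) (throws : List String) (dp : List (List Int)) : Int :=
  match pyGet2 dp currentPlayer throwNum with
  | none => 0
  | some v =>
    if v ≠ -1 then 0
    else
      let frontier := (PySem.List.pyRange throwNum m 1).foldl (fun (frontier : PySem.Set Int) t =>
        frontier.foldl (fun (nxt : PySem.Set Int) p =>
          if pyGet2 dp p t ≠ some (-1) then nxt
          else
            match PySem.List.pyGet? throws t with
            | none => nxt
            | some s =>
              match PySem.Str.pyGet? s 0, PySem.Str.pyGet? s 1 with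
              | some c0, some c1 =>
                match PySem.Int.ofStr? (String.ofList [c0]) with
                | none => nxt
                | some d =>
                  let nxt1 := if c1 ≠ '1' then PySem.Set.add nxt (PySem.Int.mod (p + d) n) else nxt
                  if c1 ≠ '0' then PySem.Set.add nxt1 (PySem.Int.mod (p - d + n) n) else nxt1
              | _, _ => nxt)
          PySem.Set.empty)
        (PySem.Set.ofList [currentPlayer])
      frontier.foldl (fun acc p => if pyGet2 dp p m = some (-1) then acc + 1 else acc) 0

-- ===== PRECONDITION & SPEC =====
-- throwOK s: Python's int(s[0]) succeeds and s[1] exists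
def throwOK (s : String) : Bool :=
  match s.toList with
  | c0 :: _ :: _ => (PySem.Int.ofStr? (String.ofList [c0])).isSome
  | _ => false

-- Pre_dfs admits (a) every input that stops at the first lines of dfs — the start entry
-- dp[currentPlayer][throwNum] resolves under Python indexing and is either already marked
-- (≠ -1, return 0) or at the last level throwNum = m (return 1) — and (b) for a real search,
-- the natural call shape: 0 < n players, 0 ≤ currentPlayer < n, 0 ≤ throwNum ≤ m, a dp table
-- with at least n rows of width > m, int-parseable two-char throw entries up to index m.
-- Outside it A raises (IndexError/ValueError/ZeroDivisionError/RecursionError) — except that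
-- a deep search can also return via Python negative-index wraparound or on ragged tables it
-- happens not to touch, which this Pre_ excludes as accidental shapes (see claim cites).
def Pre_dfs (n : Int) (m : Int) (throwNum : Int) (currentPlayer : Int) (throws : List String) (dp : List (List Int)) : Prop :=
  ((pyGet2 dp currentPlayer throwNum).isSome = true ∧
    ((pyGet2 dp currentPlayer throwNum).getD 0 ≠ -1 ∨ throwNum = m)) ∨
  (0 < n ∧ 0 ≤ throwNum ∧ throwNum ≤ m ∧ 0 ≤ currentPlayer ∧ currentPlayer < n ∧
   n ≤ (dp.length : Int) ∧ (∀ row ∈ dp, m < (row.length : Int)) ∧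
   m ≤ (throws.length : Int) ∧ (∀ s ∈ throws.take m.toNat, throwOK s = true))

instance (n : Int) (m : Int) (throwNum : Int) (currentPlayer : Int) (throws : List String) (dp : List (List Int)) : Decidable (Pre_dfs n m throwNum currentPlayer throws dp) := by
  unfold Pre_dfs; infer_instance

def pvWitness_dfs : Int × Int × Int × Int × List String × List (List Int) :=
  (2, 1, 0, 0, ["10"], [[-1, -1], [-1, -1]])

def Spec_dfs (n : Int) (m : Int) (throwNum : Int) (currentPlayer : Int) (throws : List String) (dp : List (List Int)) (out : Int) : Prop := out = dfs_alt n m throwNum currentPlayer throws dp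
instance (n : Int) (m : Int) (throwNum : Int) (currentPlayer : Int) (throws : List String) (dp : List (List Int)) (out : Int) : Decidable (Spec_dfs n m throwNum currentPlayer throws dp out) := by unfold Spec_dfs; infer_instance

-- ===== CLAIM (what is proved, stated in full; the proofs are below) =====
def Claim_equal_dfs : Prop := ∀ (n : Int) (m : Int) (throwNum : Int) (currentPlayer : Int) (throws : List String) (dp : List (List Int)), Dom_dfs n m throwNum currentPlayer throws dp → Pre_dfs n m throwNum currentPlayer throws dp → Spec_dfs n m throwNum currentPlayer throws dp (dfs n m throwNum currentPlayer throws dp)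

-- ===== LEMMAS AND PROOFS =====

-- the (up to two) successors of player p at level t, as A and B both compute them
def movesL (n : Int) (throws : List String) (t p : Int) : List Int :=
  match PySem.List.pyGet? throws t with
  | none => []
  | some s =>
    match PySem.Str.pyGet? s 0, PySem.Str.pyGet? s 1 with
    | some c0, some c1 =>
      match PySem.Int.ofStr? (String.ofList [c0]) with
      | none => []
      | some d =>
        if c1 = '0' then [PySem.Int.mod (p + d) n]
        else if c1 = '1' then [PySem.Int.mod (p - d + n) n]
        else [PySem.Int.mod (p + d) n, PySem.Int.mod (p - d + n) n]
    | _, _ => []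

def movesF (n : Int) (throws : List String) (t p : Int) : Finset Int := (movesL n throws t p).toFinset

-- the dp-unvisited members of S at level t
def aliveF (dp : List (List Int)) (t : Int) (S : Finset Int) : Finset Int :=
  S.filter (fun p => pyGet2 dp p t = some (-1))

def stepF (n : Int) (throws : List String) (dp : List (List Int)) (t : Int) (S : Finset Int) : Finset Int :=
  (aliveF dp t S).biUnion (fun p => movesF n throws t p)

-- the players reachable j levels below (t, S) through dp-unvisited states
def reachF (n : Int) (throws : List String) (dp : List (List Int)) : Int → Finset Int → Nat → Finset Int
  | _, S, 0 => S
  | t, S, (j + 1) => reachF n throws dp (t + 1) (stepF n throws dp t S) j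

-- the states A's DFS from (t, S) visits (and marks)
def Vis (n : Int) (throws : List String) (dp : List (List Int)) (t : Int) (S : Finset Int) (k : Nat) (q u : Int) : Prop :=
  ∃ j : Nat, j ≤ k ∧ u = t + (j : Int) ∧ q ∈ aliveF dp (t + (j : Int)) (reachF n throws dp t S j)

-- dp' is dp with exactly the visited states overwritten by non-(-1) values
def MarksUpd (n : Int) (throws : List String) (dp dp' : List (List Int)) (t : Int) (S : Finset Int) (k : Nat) : Prop :=
  dp'.length = dp.length ∧
  (∀ i : Nat, (dp'[i]?).map List.length = (dp[i]?).map List.length) ∧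
  (∀ q u, Vis n throws dp t S k q u → ∃ v, pyGet2 dp' q u = some v ∧ v ≠ -1) ∧
  (∀ q u, 0 ≤ q → 0 ≤ u → ¬ Vis n throws dp t S k q u → pyGet2 dp' q u = pyGet2 dp q u)

def ShapeOK (n m : Int) (dp : List (List Int)) : Prop :=
  n ≤ (dp.length : Int) ∧ ∀ row ∈ dp, m < (row.length : Int)

def ThrowsOK (m : Int) (throws : List String) : Prop :=
  ∀ t : Int, 0 ≤ t → t < m → ∃ s, PySem.List.pyGet? throws t = some s ∧ throwOK s = true

lemma movesL_nonneg (n : Int) (throws : List String) (t p : Int) (hn : 0 < n) :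
    ∀ q ∈ movesL n throws t p, 0 ≤ q ∧ q < n := by
  intro q hq
  have key : ∀ x : Int, q = PySem.Int.mod x n → 0 ≤ q ∧ q < n := by
    rintro x rfl
    exact ⟨PySem.Int.mod_nonneg x hn, PySem.Int.mod_lt x hn⟩
  unfold movesL at hq
  repeat' split at hq
  all_goals simp only [List.mem_cons, List.not_mem_nil, or_false] at hq
  all_goals first
    | exact key _ hq
    | (rcases hq with hq | hq
       exacts [key _ hq, key _ hq])

lemma pyGet2_some_of_inrange (n m : Int) (dp : List (List Int)) (hS : ShapeOK n m dp)
    (q u : Int) (hq0 : 0 ≤ q) (hqn : q < n) (hu0 : 0 ≤ u) (hum : u ≤ m) :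
    ∃ v, pyGet2 dp q u = some v := by
  obtain ⟨hl, hr⟩ := hS
  have hq' : q.toNat < dp.length := by omega
  have hrow : dp[q.toNat]? = some dp[q.toNat] := List.getElem?_eq_getElem hq'
  have hmem : dp[q.toNat] ∈ dp := List.getElem_mem hq'
  have hlen : m < (dp[q.toNat].length : Int) := hr _ hmem
  have hu' : u.toNat < dp[q.toNat].length := by omega
  refine ⟨dp[q.toNat][u.toNat], ?_⟩
  unfold pyGet2
  rw [PySem.List.pyGet?_of_nonneg _ hq0, hrow, Option.bind_some,
    PySem.List.pyGet?_of_nonneg _ hu0, List.getElem?_eq_getElem hu']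

lemma pyGet2_pySet2 (n m : Int) (dp : List (List Int)) (hS : ShapeOK n m dp)
    (p t v q u : Int) (hp0 : 0 ≤ p) (hpn : p < n) (ht0 : 0 ≤ t) (htm : t ≤ m)
    (hq : 0 ≤ q) (hu : 0 ≤ u) :
    pyGet2 (pySet2 dp p t v) q u = if q = p ∧ u = t then some v else pyGet2 dp q u := by
  obtain ⟨hl, hr⟩ := hS
  have hp' : p.toNat < dp.length := by omega
  have hrow : dp[p.toNat]? = some dp[p.toNat] := List.getElem?_eq_getElem hp'
  have hmem : dp[p.toNat] ∈ dp := List.getElem_mem hp'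
  have hlen : m < (dp[p.toNat].length : Int) := hr _ hmem
  have ht' : t.toNat < dp[p.toNat].length := by omega
  unfold pySet2
  rw [PySem.List.pyGet?_of_nonneg _ hp0, hrow]
  simp only
  rw [PySem.List.pySetD_of_nonneg _ _ hp0, PySem.List.pySetD_of_nonneg _ _ ht0]
  unfold pyGet2
  rw [PySem.List.pyGet?_of_nonneg _ hq]
  by_cases hqp : q = p
  · subst hqp
    rw [List.getElem?_set_self (by omega), Option.bind_some, PySem.List.pyGet?_of_nonneg _ hu]
    by_cases hut : u = t
    · subst hut
      rw [List.getElem?_set_self ht']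
      simp
    · have hne : t.toNat ≠ u.toNat := by omega
      rw [List.getElem?_set_ne hne]
      simp only [hut, and_false, if_false]
      rw [PySem.List.pyGet?_of_nonneg _ hq, hrow, Option.bind_some,
        PySem.List.pyGet?_of_nonneg _ hu]
  · have hne : p.toNat ≠ q.toNat := by omega
    rw [List.getElem?_set_ne hne]
    simp only [hqp, false_and, if_false]
    rw [PySem.List.pyGet?_of_nonneg _ hq]

lemma length_pySet2 (dp : List (List Int)) (p t v : Int) : (pySet2 dp p t v).length = dp.length := by
  unfold pySet2
  split
  · rfl
  · exact PySem.List.length_pySetD _ _ _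

lemma rows_pySet2 (dp : List (List Int)) (p t v : Int) (hp0 : 0 ≤ p) :
    ∀ i : Nat, ((pySet2 dp p t v)[i]?).map List.length = (dp[i]?).map List.length := by
  intro i
  unfold pySet2
  cases hrow : PySem.List.pyGet? dp p with
  | none => rfl
  | some row =>
    simp only
    rw [PySem.List.pySetD_of_nonneg _ _ hp0]
    have hrow' : dp[p.toNat]? = some row := by
      rw [PySem.List.pyGet?_of_nonneg _ hp0] at hrow; exact hrow
    have hp' : p.toNat < dp.length := by
      by_contra h
      rw [List.getElem?_eq_none (by omega)] at hrow'
      exact absurd hrow' (by simp)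
    by_cases hip : p.toNat = i
    · subst hip
      rw [List.getElem?_set_self hp', hrow']
      simp [PySem.List.length_pySetD]
    · rw [List.getElem?_set_ne hip]

lemma ShapeOK_of_rows (n m : Int) (dp dp' : List (List Int)) (hS : ShapeOK n m dp)
    (hlen : dp'.length = dp.length)
    (hrows : ∀ i : Nat, (dp'[i]?).map List.length = (dp[i]?).map List.length) :
    ShapeOK n m dp' := by
  obtain ⟨h1, h2⟩ := hS
  refine ⟨by omega, ?_⟩
  intro row hrow
  obtain ⟨i, hi, hget⟩ := List.getElem_of_mem hrow
  have hmap := hrows i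
  rw [List.getElem?_eq_getElem hi, hget] at hmap
  have hi' : i < dp.length := by omega
  rw [List.getElem?_eq_getElem hi'] at hmap
  simp only [Option.map_some, Option.some.injEq] at hmap
  rw [hmap]
  exact h2 _ (List.getElem_mem hi')

lemma aliveF_mono (dp : List (List Int)) (t : Int) (S T : Finset Int) (h : S ⊆ T) :
    aliveF dp t S ⊆ aliveF dp t T := Finset.filter_subset_filter _ h

lemma aliveF_union (dp : List (List Int)) (t : Int) (S T : Finset Int) :
    aliveF dp t (S ∪ T) = aliveF dp t S ∪ aliveF dp t T := Finset.filter_union _ S T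

lemma stepF_mono (n : Int) (throws : List String) (dp : List (List Int)) (t : Int)
    (S T : Finset Int) (h : S ⊆ T) : stepF n throws dp t S ⊆ stepF n throws dp t T :=
  Finset.biUnion_subset_biUnion_of_subset_left _ (aliveF_mono dp t S T h)

lemma reachF_mono (n : Int) (throws : List String) (dp : List (List Int)) :
    ∀ (j : Nat) (t : Int) (S T : Finset Int), S ⊆ T →
      reachF n throws dp t S j ⊆ reachF n throws dp t T j := by
  intro j
  induction j with
  | zero => intro t S T h; exact h
  | succ j ih =>
    intro t S T h
    exact ih (t + 1) _ _ (stepF_mono n throws dp t S T h)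

lemma reachF_empty (n : Int) (throws : List String) (dp : List (List Int)) :
    ∀ (j : Nat) (t : Int), reachF n throws dp t ∅ j = ∅ := by
  intro j
  induction j with
  | zero => intro t; rfl
  | succ j ih =>
    intro t
    have hstep : stepF n throws dp t ∅ = ∅ := by
      unfold stepF aliveF
      simp
    show reachF n throws dp (t + 1) (stepF n throws dp t ∅) j = ∅
    rw [hstep]
    exact ih (t + 1)

lemma stepF_nonneg (n : Int) (throws : List String) (dp : List (List Int)) (hn : 0 < n)
    (t : Int) (S : Finset Int) : ∀ q ∈ stepF n throws dp t S, 0 ≤ q := by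
  intro q hq
  rw [stepF, Finset.mem_biUnion] at hq
  obtain ⟨p, _, hq⟩ := hq
  rw [movesF, List.mem_toFinset] at hq
  exact (movesL_nonneg n throws t p hn q hq).1

lemma reachF_nonneg (n : Int) (throws : List String) (dp : List (List Int)) (hn : 0 < n) :
    ∀ (j : Nat) (t : Int) (S : Finset Int), (∀ p ∈ S, 0 ≤ p) →
      ∀ q ∈ reachF n throws dp t S j, 0 ≤ q := by
  intro j
  induction j with
  | zero => intro t S hS q hq; exact hS q hq
  | succ j ih =>
    intro t S hS q hq
    exact ih (t + 1) _ (stepF_nonneg n throws dp hn t S) q hq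

lemma Vis_succ (n : Int) (throws : List String) (dp : List (List Int)) (t : Int) (S : Finset Int) (k : Nat) (q u : Int) :
    Vis n throws dp t S (k + 1) q u ↔
      (u = t ∧ q ∈ aliveF dp t S) ∨ Vis n throws dp (t + 1) (stepF n throws dp t S) k q u := by
  constructor
  · rintro ⟨j, hj, rfl, hq⟩
    cases j with
    | zero => left; exact ⟨by simp, by simpa using hq⟩
    | succ j =>
      right
      refine ⟨j, by omega, by push_cast; ring, ?_⟩
      have hlev : t + ((j : Int) + 1) = t + 1 + (j : Int) := by ring
      simpa [reachF, hlev] using hq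
  · rintro (⟨rfl, hq⟩ | ⟨j, hj, rfl, hq⟩)
    · exact ⟨0, by omega, by simp, by simpa using hq⟩
    · refine ⟨j + 1, by omega, by push_cast; ring, ?_⟩
      have hlev : t + ((j : Int) + 1) = t + 1 + (j : Int) := by ring
      simpa [reachF, hlev] using hq

lemma reachF_succ_back (n : Int) (throws : List String) (dp : List (List Int)) :
    ∀ (i : Nat) (t : Int) (S : Finset Int),
      reachF n throws dp t S (i + 1) = stepF n throws dp (t + (i : Int)) (reachF n throws dp t S i) := by
  intro i
  induction i with
  | zero => intro t S; simp [reachF]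
  | succ i ih =>
    intro t S
    show reachF n throws dp (t + 1) (stepF n throws dp t S) (i + 1) = _
    rw [ih (t + 1) (stepF n throws dp t S)]
    have hc : t + 1 + (i : Int) = t + ((i : Nat) + 1 : Nat) := by push_cast; ring
    rw [hc]
    rfl

-- on dp' = dp + marks of the states visited from (t, S), the still-unvisited members of T
-- are exactly the dp-unvisited members of T not already visited from (t, S)
lemma alive_split (n : Int) (throws : List String) (dp dp' : List (List Int)) (t : Int) (S : Finset Int) (k : Nat)
    (hM : MarksUpd n throws dp dp' t S k) (ht : 0 ≤ t) :
    ∀ (i : Nat), i ≤ k → ∀ T : Finset Int, (∀ p ∈ T, 0 ≤ p) →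
      aliveF dp' (t + (i : Int)) T
        = aliveF dp (t + (i : Int)) (reachF n throws dp t S i ∪ T)
          \ aliveF dp (t + (i : Int)) (reachF n throws dp t S i) := by
  obtain ⟨_, _, hMark, hKeep⟩ := hM
  intro i hik T hT
  ext q
  simp only [aliveF, Finset.mem_filter, Finset.mem_sdiff, Finset.mem_union]
  have hu0 : (0 : Int) ≤ t + (i : Int) := by positivity
  constructor
  · rintro ⟨hqT, hP'⟩
    have hq0 : 0 ≤ q := hT q hqT
    by_cases hvis : Vis n throws dp t S k q (t + (i : Int))
    · obtain ⟨v, hv, hvne⟩ := hMark q _ hvis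
      rw [hv] at hP'
      exact absurd (Option.some.injEq _ _ ▸ hP') (by simpa using hvne)
    · have hP := hKeep q _ hq0 hu0 hvis
      rw [hP] at hP'
      have hnotSi : ¬(q ∈ reachF n throws dp t S i ∧ pyGet2 dp q (t + (i : Int)) = some (-1)) := by
        rintro ⟨hmem, hPv⟩
        exact hvis ⟨i, hik, rfl, by simp [aliveF, Finset.mem_filter, hmem, hPv]⟩
      exact ⟨⟨Or.inr hqT, hP'⟩, fun h => hnotSi h⟩
  · rintro ⟨⟨hqu, hP⟩, hnot⟩
    have hqT : q ∈ T := by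
      rcases hqu with h | h
      · exact absurd ⟨h, hP⟩ hnot
      · exact h
    have hq0 : 0 ≤ q := hT q hqT
    have hvis : ¬ Vis n throws dp t S k q (t + (i : Int)) := by
      rintro ⟨j, hj, hu, hmem⟩
      have hij : j = i := by omega
      subst hij
      rw [aliveF, Finset.mem_filter] at hmem
      exact hnot hmem
    rw [hKeep q _ hq0 hu0 hvis]
    exact ⟨hqT, hP⟩

-- THE memo lemma: running A's DFS on dp' = dp + marks of the states visited from (t, S)
-- reaches exactly the endpoints not already reached from (t, S)
lemma split_core (n : Int) (throws : List String) (dp dp' : List (List Int)) (t : Int) (S : Finset Int) (k : Nat)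
    (hM : MarksUpd n throws dp dp' t S k) (hn : 0 < n) (ht : 0 ≤ t) :
    ∀ (j i : Nat), i + j ≤ k → ∀ T : Finset Int, (∀ p ∈ T, 0 ≤ p) →
      aliveF dp' (t + (i : Int) + (j : Int)) (reachF n throws dp' (t + (i : Int)) T j)
        = aliveF dp (t + (i : Int) + (j : Int)) (reachF n throws dp (t + (i : Int)) (reachF n throws dp t S i ∪ T) j)
          \ aliveF dp (t + (i : Int) + (j : Int)) (reachF n throws dp (t + (i : Int)) (reachF n throws dp t S i) j) := by
  intro j
  induction j with
  | zero =>
    intro i hik T hT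
    simpa [reachF] using alive_split n throws dp dp' t S k hM ht i (by omega) T hT
  | succ j ih =>
    intro i hik T hT
    have hB := alive_split n throws dp dp' t S k hM ht i (by omega) T hT
    have hunion : stepF n throws dp (t + (i : Int)) (reachF n throws dp t S i)
          ∪ stepF n throws dp' (t + (i : Int)) T
        = stepF n throws dp (t + (i : Int)) (reachF n throws dp t S i ∪ T) := by
      unfold stepF
      rw [hB, aliveF_union, ← Finset.union_biUnion]
      congr 1
      rw [Finset.union_sdiff_self_eq_union, ← Finset.union_assoc, Finset.union_self]
    have ihi := ih (i + 1) (by omega) (stepF n throws dp' (t + (i : Int)) T)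
      (stepF_nonneg n throws dp' hn _ T)
    have hc : ((i + 1 : Nat) : Int) = (i : Int) + 1 := by push_cast; ring
    rw [hc] at ihi
    rw [reachF_succ_back] at ihi
    rw [hunion] at ihi
    have hl : t + (i : Int) + ((j + 1 : Nat) : Int) = t + ((i : Int) + 1) + (j : Int) := by
      push_cast; ring
    rw [hl]
    have ha : t + ((i : Int) + 1) = t + (i : Int) + 1 := by ring
    rw [ha] at ihi ⊢
    simp only [reachF]
    exact ihi

lemma alive_split_union (n : Int) (throws : List String) (dp dp' : List (List Int)) (t : Int) (S T : Finset Int) (k : Nat)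
    (hM : MarksUpd n throws dp dp' t S k) (hn : 0 < n) (ht : 0 ≤ t)
    (hT : ∀ p ∈ T, 0 ≤ p) :
    ∀ j : Nat, j ≤ k →
      aliveF dp (t + (j : Int)) (reachF n throws dp t (S ∪ T) j)
        = aliveF dp (t + (j : Int)) (reachF n throws dp t S j)
          ∪ aliveF dp' (t + (j : Int)) (reachF n throws dp' t T j) := by
  intro j hj
  have h := split_core n throws dp dp' t S k hM hn ht j 0 (by omega) T hT
  simp only [Nat.cast_zero, add_zero, reachF] at h
  rw [h]
  exact (Finset.union_sdiff_of_subset (aliveF_mono _ _ _ _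
    (reachF_mono n throws dp j t _ _ Finset.subset_union_left))).symm

lemma Vis_union (n : Int) (throws : List String) (dp dp' : List (List Int)) (t : Int) (S T : Finset Int) (k : Nat)
    (hM : MarksUpd n throws dp dp' t S k) (hn : 0 < n) (ht : 0 ≤ t)
    (hT : ∀ p ∈ T, 0 ≤ p) :
    ∀ q u, Vis n throws dp t (S ∪ T) k q u ↔ Vis n throws dp t S k q u ∨ Vis n throws dp' t T k q u := by
  intro q u
  constructor
  · rintro ⟨j, hj, rfl, hmem⟩
    rw [alive_split_union n throws dp dp' t S T k hM hn ht hT j hj, Finset.mem_union] at hmem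
    rcases hmem with h | h
    · exact Or.inl ⟨j, hj, rfl, h⟩
    · exact Or.inr ⟨j, hj, rfl, h⟩
  · rintro (⟨j, hj, rfl, hmem⟩ | ⟨j, hj, rfl, hmem⟩) <;>
      refine ⟨j, hj, rfl, ?_⟩ <;>
      rw [alive_split_union n throws dp dp' t S T k hM hn ht hT j hj, Finset.mem_union]
    exacts [Or.inl hmem, Or.inr hmem]

-- a visited start state kills the whole search: nothing below it is alive
lemma dead_start (n : Int) (throws : List String) (dp : List (List Int)) (tn cur : Int)
    (h : ¬ pyGet2 dp cur tn = some (-1)) :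
    ∀ j : Nat, aliveF dp (tn + (j : Int)) (reachF n throws dp tn {cur} j) = ∅ := by
  intro j
  cases j with
  | zero => simp [reachF, aliveF, Finset.filter_singleton, h]
  | succ j =>
    have h0 : stepF n throws dp tn {cur} = ∅ := by
      unfold stepF aliveF
      rw [Finset.filter_singleton, if_neg h]
      simp
    show aliveF _ _ (reachF n throws dp tn {cur} (j + 1)) = ∅
    simp only [reachF]
    rw [h0, reachF_empty]
    simp [aliveF]

lemma MarksUpd_refl (n : Int) (throws : List String) (dp : List (List Int)) (tn cur : Int) (k : Nat)
    (h : ¬ pyGet2 dp cur tn = some (-1)) : MarksUpd n throws dp dp tn {cur} k := by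
  refine ⟨rfl, fun i => rfl, ?_, ?_⟩
  · rintro q u ⟨j, hj, rfl, hmem⟩
    rw [dead_start n throws dp tn cur h j] at hmem
    exact absurd hmem (Finset.notMem_empty q)
  · intro q u _ _ _
    rfl

lemma Vis_bounds (n : Int) (throws : List String) (dp : List (List Int)) (hn : 0 < n)
    (t : Int) (S : Finset Int) (hS : ∀ p ∈ S, 0 ≤ p) (k : Nat) (q u : Int)
    (h : Vis n throws dp t S k q u) : 0 ≤ q ∧ t ≤ u := by
  obtain ⟨j, hj, rfl, hmem⟩ := h
  refine ⟨reachF_nonneg n throws dp hn j t S hS q (Finset.mem_of_mem_filter q hmem), by omega⟩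

-- main characterization of port A: result = number of endpoints reachable through
-- dp-unvisited states, and the final dp marks exactly the visited states
lemma dfsAux_char (n m : Int) (throws : List String) (hn : 0 < n) (hT : ThrowsOK m throws) :
    ∀ (k : Nat) (tn cur : Int) (dp : List (List Int)),
      ShapeOK n m dp → 0 ≤ tn → tn + (k : Int) = m → 0 ≤ cur → cur < n →
      (dfsAux k n m tn cur throws dp).1
          = ((aliveF dp (tn + (k : Int)) (reachF n throws dp tn {cur} k)).card : Int)
        ∧ MarksUpd n throws dp (dfsAux k n m tn cur throws dp).2 tn {cur} k
        ∧ ShapeOK n m (dfsAux k n m tn cur throws dp).2 := by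
  intro k
  induction k with
  | zero =>
    intro tn cur dp hSh htn0 htnm hc0 hcn
    have htnm' : tn = m := by push_cast at htnm; omega
    obtain ⟨v, hv⟩ := pyGet2_some_of_inrange n m dp hSh cur tn hc0 hcn htn0 (le_of_eq htnm')
    by_cases hval : v = -1
    · subst hval
      have hres : dfsAux 0 n m tn cur throws dp = (1, pySet2 dp cur m 1) := by
        conv_lhs => rw [dfsAux]
        rw [hv]
        simp [htnm']
      rw [hres]
      refine ⟨?_, ?_, ?_⟩
      · simp only [reachF, Nat.cast_zero, add_zero]
        rw [aliveF, Finset.filter_singleton, if_pos hv]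
        simp
      · refine ⟨length_pySet2 dp cur m 1, rows_pySet2 dp cur m 1 hc0, ?_, ?_⟩
        · rintro q u ⟨j, hj, rfl, hmem⟩
          interval_cases j
          simp only [Nat.cast_zero, add_zero, reachF, aliveF] at hmem
          rw [Finset.filter_singleton, if_pos hv, Finset.mem_singleton] at hmem
          refine ⟨1, ?_, by omega⟩
          simp only [Nat.cast_zero, add_zero]
          show pyGet2 (pySet2 dp cur m 1) q tn = some 1
          rw [pyGet2_pySet2 n m dp hSh cur m 1 q tn hc0 hcn (by omega) (by omega) (hmem ▸ hc0) htn0]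
          rw [if_pos ⟨hmem, htnm'⟩]
        · intro q u hq0 hu0 hnvis
          show pyGet2 (pySet2 dp cur m 1) q u = pyGet2 dp q u
          rw [pyGet2_pySet2 n m dp hSh cur m 1 q u hc0 hcn (by omega) (by omega) hq0 hu0]
          rw [if_neg ?_]
          rintro ⟨rfl, rfl⟩
          exact hnvis ⟨0, by omega, by simp [htnm'], by
            simp only [Nat.cast_zero, add_zero, reachF, aliveF]
            rw [Finset.filter_singleton, if_pos (htnm' ▸ hv)]
            simp⟩
      · exact ShapeOK_of_rows n m dp _ hSh (length_pySet2 dp cur m 1) (rows_pySet2 dp cur m 1 hc0)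
    · have hres : dfsAux 0 n m tn cur throws dp = (0, dp) := by
        conv_lhs => rw [dfsAux]
        rw [hv]
        simp [hval]
      have hdead : ¬ pyGet2 dp cur tn = some (-1) := by
        rw [hv]
        simp [hval]
      rw [hres]
      refine ⟨?_, MarksUpd_refl n throws dp tn cur 0 hdead, hSh⟩
      rw [dead_start n throws dp tn cur hdead 0]
      simp
  | succ k ih =>
    intro tn cur dp hSh htn0 htnm hc0 hcn
    have htnlt : tn < m := by push_cast at htnm; omega
    have hm' : tn + 1 + (k : Int) = m := by push_cast at htnm ⊢; omega
    obtain ⟨v, hv⟩ := pyGet2_some_of_inrange n m dp hSh cur tn hc0 hcn htn0 (by omega)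
    by_cases hval : v = -1
    case neg =>
      have hres : dfsAux (k + 1) n m tn cur throws dp = (0, dp) := by
        conv_lhs => rw [dfsAux]
        rw [hv]
        simp [hval]
      have hdead : ¬ pyGet2 dp cur tn = some (-1) := by
        rw [hv]
        simp [hval]
      rw [hres]
      refine ⟨?_, MarksUpd_refl n throws dp tn cur (k + 1) hdead, hSh⟩
      rw [dead_start n throws dp tn cur hdead (k + 1)]
      simp
    case pos =>
    subst hval
    obtain ⟨s, hs, hsOK⟩ := hT tn htn0 htnlt
    unfold throwOK at hsOK
    rcases hlist : s.toList with _ | ⟨c0, _ | ⟨c1, rest⟩⟩ <;> rw [hlist] at hsOK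
    · simp at hsOK
    · simp at hsOK
    have hsOK' : (PySem.Int.ofStr? (String.ofList [c0])).isSome = true := hsOK
    obtain ⟨d, hd⟩ := Option.isSome_iff_exists.mp hsOK'
    have hc0get : PySem.Str.pyGet? s 0 = some c0 := by
      simp [PySem.Str.pyGet?, hlist]
    have hc1get : PySem.Str.pyGet? s 1 = some c1 := by
      simp [PySem.Str.pyGet?, hlist]
    have hf0 : 0 ≤ PySem.Int.mod (cur + d) n := PySem.Int.mod_nonneg _ hn
    have hfn : PySem.Int.mod (cur + d) n < n := PySem.Int.mod_lt _ hn
    have hs0 : 0 ≤ PySem.Int.mod (cur - d + n) n := PySem.Int.mod_nonneg _ hn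
    have hsn : PySem.Int.mod (cur - d + n) n < n := PySem.Int.mod_lt _ hn
    have hfS : ∀ p ∈ ({PySem.Int.mod (cur + d) n} : Finset Int), 0 ≤ p := by
      intro p hp; rw [Finset.mem_singleton] at hp; exact hp ▸ hf0
    have hsS : ∀ p ∈ ({PySem.Int.mod (cur - d + n) n} : Finset Int), 0 ≤ p := by
      intro p hp; rw [Finset.mem_singleton] at hp; exact hp ▸ hs0
    have hmv : movesL n throws tn cur
        = (if c1 = '0' then [PySem.Int.mod (cur + d) n]
           else if c1 = '1' then [PySem.Int.mod (cur - d + n) n]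
           else [PySem.Int.mod (cur + d) n, PySem.Int.mod (cur - d + n) n]) := by
      unfold movesL
      rw [hs]
      simp only [hc0get, hc1get, hd]
    have hstep : stepF n throws dp tn {cur} = (movesL n throws tn cur).toFinset := by
      unfold stepF aliveF
      rw [Finset.filter_singleton, if_pos hv, Finset.singleton_biUnion]
      rfl
    have hlev : tn + ((k + 1 : Nat) : Int) = tn + 1 + (k : Int) := by push_cast; ring
    have hcurmem : cur ∈ aliveF dp tn {cur} := by
      rw [aliveF, Finset.filter_singleton, if_pos hv]
      exact Finset.mem_singleton_self cur
    by_cases hcz : c1 = '0'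
    · -- clockwise only
      have hsteps : stepF n throws dp tn {cur} = {PySem.Int.mod (cur + d) n} := by
        rw [hstep, hmv, if_pos hcz]
        simp
      have hres : dfsAux (k + 1) n m tn cur throws dp
          = ((dfsAux k n m (tn + 1) (PySem.Int.mod (cur + d) n) throws dp).1,
             pySet2 (dfsAux k n m (tn + 1) (PySem.Int.mod (cur + d) n) throws dp).2 cur tn
               (dfsAux k n m (tn + 1) (PySem.Int.mod (cur + d) n) throws dp).1) := by
        conv_lhs => rw [dfsAux]
        rw [hv]
        simp only [hs, hc0get, hc1get, hd, if_neg (show ¬((-1 : Int) ≠ -1) by simp),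
          if_neg (show ¬ tn = m by omega), if_pos hcz]
      obtain ⟨ih1, ih2, ih3⟩ := ih (tn + 1) (PySem.Int.mod (cur + d) n) dp hSh (by omega) hm' hf0 hfn
      set r := dfsAux k n m (tn + 1) (PySem.Int.mod (cur + d) n) throws dp with hr
      rw [hres]
      refine ⟨?_, ?_, ?_⟩
      · show r.1 = _
        rw [ih1, hlev]
        simp only [reachF]
        rw [hsteps]
      · refine ⟨by rw [length_pySet2]; exact ih2.1,
          fun i => (rows_pySet2 r.2 cur tn r.1 hc0 i).trans (ih2.2.1 i), ?_, ?_⟩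
        · intro q u hvis
          rw [Vis_succ, hsteps] at hvis
          rcases hvis with ⟨hu, hq⟩ | hvis
          · have hqc : q = cur := by
              rw [aliveF, Finset.filter_singleton, if_pos hv, Finset.mem_singleton] at hq
              exact hq
            refine ⟨r.1, ?_, by rw [ih1]; omega⟩
            show pyGet2 (pySet2 r.2 cur tn r.1) q u = some r.1
            rw [pyGet2_pySet2 n m r.2 ih3 cur tn r.1 q u hc0 hcn htn0 (by omega) (hqc ▸ hc0) (by omega),
              if_pos ⟨hqc, hu⟩]
          · obtain ⟨hq0, hu1⟩ := Vis_bounds n throws dp hn (tn + 1) _ hfS k q u hvis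
            obtain ⟨w, hw, hwne⟩ := ih2.2.2.1 q u hvis
            refine ⟨w, ?_, hwne⟩
            show pyGet2 (pySet2 r.2 cur tn r.1) q u = some w
            rw [pyGet2_pySet2 n m r.2 ih3 cur tn r.1 q u hc0 hcn htn0 (by omega) hq0 (by omega),
              if_neg (by rintro ⟨rfl, rfl⟩; omega), hw]
        · intro q u hq0 hu0 hnvis
          rw [Vis_succ, hsteps] at hnvis
          obtain ⟨hn1, hn2⟩ := not_or.mp hnvis
          show pyGet2 (pySet2 r.2 cur tn r.1) q u = pyGet2 dp q u
          rw [pyGet2_pySet2 n m r.2 ih3 cur tn r.1 q u hc0 hcn htn0 (by omega) hq0 hu0,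
            if_neg (by rintro ⟨rfl, rfl⟩; exact hn1 ⟨rfl, hcurmem⟩)]
          exact ih2.2.2.2 q u hq0 hu0 hn2
      · exact ShapeOK_of_rows n m r.2 _ ih3 (length_pySet2 r.2 cur tn r.1)
          (rows_pySet2 r.2 cur tn r.1 hc0)
    · by_cases hco : c1 = '1'
      · -- anticlockwise only
        have hsteps : stepF n throws dp tn {cur} = {PySem.Int.mod (cur - d + n) n} := by
          rw [hstep, hmv, if_neg hcz, if_pos hco]
          simp
        have hres : dfsAux (k + 1) n m tn cur throws dp
            = ((dfsAux k n m (tn + 1) (PySem.Int.mod (cur - d + n) n) throws dp).1,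
               pySet2 (dfsAux k n m (tn + 1) (PySem.Int.mod (cur - d + n) n) throws dp).2 cur tn
                 (dfsAux k n m (tn + 1) (PySem.Int.mod (cur - d + n) n) throws dp).1) := by
          conv_lhs => rw [dfsAux]
          rw [hv]
          simp only [hs, hc0get, hc1get, hd, if_neg (show ¬((-1 : Int) ≠ -1) by simp),
            if_neg (show ¬ tn = m by omega), if_neg hcz, if_pos hco]
        obtain ⟨ih1, ih2, ih3⟩ := ih (tn + 1) (PySem.Int.mod (cur - d + n) n) dp hSh (by omega) hm' hs0 hsn
        set r := dfsAux k n m (tn + 1) (PySem.Int.mod (cur - d + n) n) throws dp with hr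
        rw [hres]
        refine ⟨?_, ?_, ?_⟩
        · show r.1 = _
          rw [ih1, hlev]
          simp only [reachF]
          rw [hsteps]
        · refine ⟨by rw [length_pySet2]; exact ih2.1,
            fun i => (rows_pySet2 r.2 cur tn r.1 hc0 i).trans (ih2.2.1 i), ?_, ?_⟩
          · intro q u hvis
            rw [Vis_succ, hsteps] at hvis
            rcases hvis with ⟨hu, hq⟩ | hvis
            · have hqc : q = cur := by
                rw [aliveF, Finset.filter_singleton, if_pos hv, Finset.mem_singleton] at hq
                exact hq
              refine ⟨r.1, ?_, by rw [ih1]; omega⟩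
              show pyGet2 (pySet2 r.2 cur tn r.1) q u = some r.1
              rw [pyGet2_pySet2 n m r.2 ih3 cur tn r.1 q u hc0 hcn htn0 (by omega) (hqc ▸ hc0) (by omega),
                if_pos ⟨hqc, hu⟩]
            · obtain ⟨hq0, hu1⟩ := Vis_bounds n throws dp hn (tn + 1) _ hsS k q u hvis
              obtain ⟨w, hw, hwne⟩ := ih2.2.2.1 q u hvis
              refine ⟨w, ?_, hwne⟩
              show pyGet2 (pySet2 r.2 cur tn r.1) q u = some w
              rw [pyGet2_pySet2 n m r.2 ih3 cur tn r.1 q u hc0 hcn htn0 (by omega) hq0 (by omega),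
                if_neg (by rintro ⟨rfl, rfl⟩; omega), hw]
          · intro q u hq0 hu0 hnvis
            rw [Vis_succ, hsteps] at hnvis
            obtain ⟨hn1, hn2⟩ := not_or.mp hnvis
            show pyGet2 (pySet2 r.2 cur tn r.1) q u = pyGet2 dp q u
            rw [pyGet2_pySet2 n m r.2 ih3 cur tn r.1 q u hc0 hcn htn0 (by omega) hq0 hu0,
              if_neg (by rintro ⟨rfl, rfl⟩; exact hn1 ⟨rfl, hcurmem⟩)]
            exact ih2.2.2.2 q u hq0 hu0 hn2
        · exact ShapeOK_of_rows n m r.2 _ ih3 (length_pySet2 r.2 cur tn r.1)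
            (rows_pySet2 r.2 cur tn r.1 hc0)
      · -- both directions
        have hsteps : stepF n throws dp tn {cur}
            = ({PySem.Int.mod (cur + d) n} ∪ {PySem.Int.mod (cur - d + n) n} : Finset Int) := by
          rw [hstep, hmv, if_neg hcz, if_neg hco]
          ext x
          simp
        have hres : dfsAux (k + 1) n m tn cur throws dp
            = ((dfsAux k n m (tn + 1) (PySem.Int.mod (cur + d) n) throws dp).1
                 + (dfsAux k n m (tn + 1) (PySem.Int.mod (cur - d + n) n) throws
                     (dfsAux k n m (tn + 1) (PySem.Int.mod (cur + d) n) throws dp).2).1,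
               pySet2 (dfsAux k n m (tn + 1) (PySem.Int.mod (cur - d + n) n) throws
                     (dfsAux k n m (tn + 1) (PySem.Int.mod (cur + d) n) throws dp).2).2 cur tn
                 ((dfsAux k n m (tn + 1) (PySem.Int.mod (cur + d) n) throws dp).1
                   + (dfsAux k n m (tn + 1) (PySem.Int.mod (cur - d + n) n) throws
                       (dfsAux k n m (tn + 1) (PySem.Int.mod (cur + d) n) throws dp).2).1)) := by
          conv_lhs => rw [dfsAux]
          rw [hv]
          simp only [hs, hc0get, hc1get, hd, if_neg (show ¬((-1 : Int) ≠ -1) by simp),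
            if_neg (show ¬ tn = m by omega), if_neg hcz, if_neg hco]
        obtain ⟨ih11, ih12, ih13⟩ := ih (tn + 1) (PySem.Int.mod (cur + d) n) dp hSh (by omega) hm' hf0 hfn
        set r1 := dfsAux k n m (tn + 1) (PySem.Int.mod (cur + d) n) throws dp with hr1
        obtain ⟨ih21, ih22, ih23⟩ := ih (tn + 1) (PySem.Int.mod (cur - d + n) n) r1.2 ih13 (by omega) hm' hs0 hsn
        set r2 := dfsAux k n m (tn + 1) (PySem.Int.mod (cur - d + n) n) throws r1.2 with hr2
        have hsplit := split_core n throws dp r1.2 (tn + 1) {PySem.Int.mod (cur + d) n} k ih12 hn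
          (by omega) k 0 (by omega) {PySem.Int.mod (cur - d + n) n} hsS
        simp only [Nat.cast_zero, add_zero, reachF] at hsplit
        have hsub : aliveF dp (tn + 1 + (k : Int)) (reachF n throws dp (tn + 1) {PySem.Int.mod (cur + d) n} k)
            ⊆ aliveF dp (tn + 1 + (k : Int)) (reachF n throws dp (tn + 1)
                ({PySem.Int.mod (cur + d) n} ∪ {PySem.Int.mod (cur - d + n) n}) k) :=
          aliveF_mono _ _ _ _ (reachF_mono n throws dp k (tn + 1) _ _ Finset.subset_union_left)
        have hvisu := Vis_union n throws dp r1.2 (tn + 1) {PySem.Int.mod (cur + d) n}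
          {PySem.Int.mod (cur - d + n) n} k ih12 hn (by omega) hsS
        rw [hres]
        refine ⟨?_, ?_, ?_⟩
        · show r1.1 + r2.1 = _
          rw [ih11, ih21, hsplit, hlev]
          simp only [reachF]
          rw [hsteps]
          have hcard := Finset.card_sdiff_add_card_eq_card hsub
          push_cast [← hcard]
          ring
        · refine ⟨by rw [length_pySet2]; exact ih22.1.trans ih12.1,
            fun i => (rows_pySet2 r2.2 cur tn _ hc0 i).trans ((ih22.2.1 i).trans (ih12.2.1 i)), ?_, ?_⟩
          · intro q u hvis
            rw [Vis_succ, hsteps] at hvis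
            rcases hvis with ⟨hu, hq⟩ | hvis
            · have hqc : q = cur := by
                rw [aliveF, Finset.filter_singleton, if_pos hv, Finset.mem_singleton] at hq
                exact hq
              refine ⟨r1.1 + r2.1, ?_, by rw [ih11, ih21]; omega⟩
              show pyGet2 (pySet2 r2.2 cur tn (r1.1 + r2.1)) q u = some (r1.1 + r2.1)
              rw [pyGet2_pySet2 n m r2.2 ih23 cur tn _ q u hc0 hcn htn0 (by omega) (hqc ▸ hc0) (by omega),
                if_pos ⟨hqc, hu⟩]
            · rw [hvisu q u] at hvis
              have hw : ∃ w, pyGet2 r2.2 q u = some w ∧ w ≠ -1 := by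
                rcases hvis with h1 | h2
                · obtain ⟨hq0, hu1⟩ := Vis_bounds n throws dp hn (tn + 1) _ hfS k q u h1
                  obtain ⟨w, hw1, hwne⟩ := ih12.2.2.1 q u h1
                  by_cases hv2 : Vis n throws r1.2 (tn + 1) {PySem.Int.mod (cur - d + n) n} k q u
                  · exact ih22.2.2.1 q u hv2
                  · exact ⟨w, (ih22.2.2.2 q u hq0 (by omega) hv2).trans hw1, hwne⟩
                · exact ih22.2.2.1 q u h2
              obtain ⟨w, hw, hwne⟩ := hw
              have hqu : 0 ≤ q ∧ tn + 1 ≤ u := by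
                rcases hvis with h1 | h2
                · exact Vis_bounds n throws dp hn (tn + 1) _ hfS k q u h1
                · exact Vis_bounds n throws r1.2 hn (tn + 1) _ hsS k q u h2
              refine ⟨w, ?_, hwne⟩
              show pyGet2 (pySet2 r2.2 cur tn (r1.1 + r2.1)) q u = some w
              rw [pyGet2_pySet2 n m r2.2 ih23 cur tn _ q u hc0 hcn htn0 (by omega) hqu.1 (by omega),
                if_neg (by rintro ⟨rfl, rfl⟩; omega), hw]
          · intro q u hq0 hu0 hnvis
            rw [Vis_succ, hsteps] at hnvis
            obtain ⟨hn1, hn2⟩ := not_or.mp hnvis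
            rw [hvisu q u] at hn2
            obtain ⟨hn21, hn22⟩ := not_or.mp hn2
            show pyGet2 (pySet2 r2.2 cur tn (r1.1 + r2.1)) q u = pyGet2 dp q u
            rw [pyGet2_pySet2 n m r2.2 ih23 cur tn _ q u hc0 hcn htn0 (by omega) hq0 hu0,
              if_neg (by rintro ⟨rfl, rfl⟩; exact hn1 ⟨rfl, hcurmem⟩)]
            exact (ih22.2.2.2 q u hq0 hu0 hn22).trans (ih12.2.2.2 q u hq0 hu0 hn21)
        · exact ShapeOK_of_rows n m r2.2 _ ih23 (length_pySet2 r2.2 cur tn _)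
            (rows_pySet2 r2.2 cur tn _ hc0)

-- B's inner loop body is: if the state is alive, insert its moves into the frontier set
lemma inner_step_eq (n : Int) (throws : List String) (dp : List (List Int)) (t : Int)
    (nxt : PySem.Set Int) (p : Int) :
    (if pyGet2 dp p t ≠ some (-1) then nxt
     else
       match PySem.List.pyGet? throws t with
       | none => nxt
       | some s =>
         match PySem.Str.pyGet? s 0, PySem.Str.pyGet? s 1 with
         | some c0, some c1 =>
           match PySem.Int.ofStr? (String.ofList [c0]) with
           | none => nxt
           | some d =>
             let nxt1 := if c1 ≠ '1' then PySem.Set.add nxt (PySem.Int.mod (p + d) n) else nxt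
             if c1 ≠ '0' then PySem.Set.add nxt1 (PySem.Int.mod (p - d + n) n) else nxt1
         | _, _ => nxt)
    = if pyGet2 dp p t = some (-1) then PySem.Set.update nxt (movesL n throws t p) else nxt := by
  by_cases hp : pyGet2 dp p t = some (-1)
  · rw [if_neg (by simp [hp]), if_pos hp]
    unfold movesL
    cases PySem.List.pyGet? throws t with
    | none => dsimp only; rw [PySem.Set.update_nil]
    | some s =>
      dsimp only
      cases PySem.Str.pyGet? s 0 with
      | none => dsimp only; rw [PySem.Set.update_nil]
      | some c0 =>
        cases PySem.Str.pyGet? s 1 with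
        | none => dsimp only; rw [PySem.Set.update_nil]
        | some c1 =>
          dsimp only
          cases PySem.Int.ofStr? (String.ofList [c0]) with
          | none => dsimp only; rw [PySem.Set.update_nil]
          | some d =>
            dsimp only
            by_cases hcz : c1 = '0'
            · rw [if_pos hcz, PySem.Set.update_cons, PySem.Set.update_nil,
                if_neg (show ¬(c1 ≠ '0') by simp [hcz]), if_pos (show c1 ≠ '1' by simp [hcz])]
            · by_cases hco : c1 = '1'
              · rw [if_neg hcz, if_pos hco, PySem.Set.update_cons, PySem.Set.update_nil,
                  if_pos (show c1 ≠ '0' from hcz), if_neg (show ¬(c1 ≠ '1') by simp [hco])]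
              · rw [if_neg hcz, if_neg hco, PySem.Set.update_cons, PySem.Set.update_cons,
                  PySem.Set.update_nil, if_pos (show c1 ≠ '0' from hcz), if_pos (show c1 ≠ '1' from hco)]
  · rw [if_pos (by simp [hp]), if_neg hp]

lemma mem_foldl_update (g : Int → List Int) (P : Int → Prop) [DecidablePred P] :
    ∀ (l : List Int) (init : PySem.Set Int) (y : Int),
      y ∈ l.foldl (fun s p => if P p then PySem.Set.update s (g p) else s) init
        ↔ y ∈ init ∨ ∃ p ∈ l, P p ∧ y ∈ g p := by
  intro l
  induction l with
  | nil => intro init y; simp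
  | cons a l ihl =>
    intro init y
    simp only [List.foldl_cons, List.mem_cons]
    rw [ihl]
    by_cases hPa : P a
    · rw [if_pos hPa]
      rw [PySem.Set.mem_update]
      constructor
      · rintro ((h | h) | ⟨p, hp, hP, hg⟩)
        · exact Or.inl h
        · exact Or.inr ⟨a, Or.inl rfl, hPa, h⟩
        · exact Or.inr ⟨p, Or.inr hp, hP, hg⟩
      · rintro (h | ⟨p, (rfl | hp), hP, hg⟩)
        · exact Or.inl (Or.inl h)
        · exact Or.inl (Or.inr hg)
        · exact Or.inr ⟨p, hp, hP, hg⟩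
    · rw [if_neg hPa]
      constructor
      · rintro (h | ⟨p, hp, hP, hg⟩)
        · exact Or.inl h
        · exact Or.inr ⟨p, Or.inr hp, hP, hg⟩
      · rintro (h | ⟨p, (rfl | hp), hP, hg⟩)
        · exact Or.inl h
        · exact absurd hP hPa
        · exact Or.inr ⟨p, hp, hP, hg⟩

lemma nodup_foldl_update (g : Int → List Int) (P : Int → Prop) [DecidablePred P] :
    ∀ (l : List Int) (init : PySem.Set Int), init.Nodup →
      (l.foldl (fun s p => if P p then PySem.Set.update s (g p) else s) init).Nodup := by
  intro l
  induction l with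
  | nil => intro init h; exact h
  | cons a l ihl =>
    intro init h
    simp only [List.foldl_cons]
    apply ihl
    by_cases hPa : P a
    · rw [if_pos hPa]; exact PySem.Set.nodup_update _ _ h
    · rw [if_neg hPa]; exact h

-- B's outer loop computes the frontier of reachable players, level by level
lemma loop_char (n : Int) (throws : List String) (dp : List (List Int)) (m : Int) :
    ∀ (k : Nat) (t : Int), t + (k : Int) = m → ∀ fr : PySem.Set Int, fr.Nodup →
      ((PySem.List.pyRange t m 1).foldl
          (fun fr t => fr.foldl
            (fun nxt p => if pyGet2 dp p t = some (-1)
              then PySem.Set.update nxt (movesL n throws t p) else nxt)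
            PySem.Set.empty) fr).Nodup
      ∧ ((PySem.List.pyRange t m 1).foldl
          (fun fr t => fr.foldl
            (fun nxt p => if pyGet2 dp p t = some (-1)
              then PySem.Set.update nxt (movesL n throws t p) else nxt)
            PySem.Set.empty) fr).toFinset = reachF n throws dp t fr.toFinset k := by
  intro k
  induction k with
  | zero =>
    intro t ht fr hnd
    rw [PySem.List.pyRange_one_eq_nil (by omega)]
    exact ⟨hnd, rfl⟩
  | succ k ihk =>
    intro t ht fr hnd
    have htm : t < m := by push_cast at ht; omega
    rw [PySem.List.pyRange_one_cons htm, List.foldl_cons]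
    have hnd' : (fr.foldl
        (fun nxt p => if pyGet2 dp p t = some (-1)
          then PySem.Set.update nxt (movesL n throws t p) else nxt)
        PySem.Set.empty).Nodup :=
      nodup_foldl_update (movesL n throws t) _ fr PySem.Set.empty (List.nodup_nil)
    have hts : (fr.foldl
        (fun nxt p => if pyGet2 dp p t = some (-1)
          then PySem.Set.update nxt (movesL n throws t p) else nxt)
        PySem.Set.empty).toFinset = stepF n throws dp t fr.toFinset := by
      ext y
      rw [List.mem_toFinset, mem_foldl_update (movesL n throws t) _ fr PySem.Set.empty y]
      simp only [stepF, Finset.mem_biUnion, aliveF, Finset.mem_filter, movesF,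
        List.mem_toFinset, PySem.Set.empty]
      constructor
      · rintro (h | ⟨p, hp, hP, hg⟩)
        · exact absurd h (List.not_mem_nil)
        · exact ⟨p, ⟨hp, hP⟩, hg⟩
      · rintro ⟨p, ⟨hp, hP⟩, hg⟩
        exact Or.inr ⟨p, hp, hP, hg⟩
    obtain ⟨h1, h2⟩ := ihk (t + 1) (by push_cast at ht ⊢; omega) _ hnd'
    refine ⟨h1, ?_⟩
    rw [h2, hts]
    rfl

-- main characterization of port B: the BFS computes the same endpoint count
lemma dfs_alt_char (n m tn cur : Int) (throws : List String) (dp : List (List Int)) (k : Nat)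
    (hk : tn + (k : Int) = m) (v : Int) (hv : pyGet2 dp cur tn = some v) :
    dfs_alt n m tn cur throws dp
      = ((aliveF dp (tn + (k : Int)) (reachF n throws dp tn {cur} k)).card : Int) := by
  unfold dfs_alt
  rw [hv]
  dsimp only
  by_cases hval : v = -1
  · subst hval
    rw [if_neg (by simp)]
    simp only [inner_step_eq]
    have hsing : PySem.Set.ofList [cur] = [cur] :=
      PySem.Set.ofList_eq_self_of_nodup [cur] (List.nodup_singleton cur)
    rw [hsing]
    obtain ⟨hnd, hts⟩ := loop_char n throws dp m k tn hk [cur] (List.nodup_singleton cur)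
    have hfs : ([cur] : List Int).toFinset = ({cur} : Finset Int) := by simp
    rw [hfs] at hts
    rw [PySem.List.foldl_ite_add_one, List.countP_eq_length_filter,
      ← List.toFinset_card_of_nodup (List.Nodup.filter _ hnd), List.toFinset_filter, hts, ← hk]
    simp [aliveF]
  · rw [if_pos (by simp [hval])]
    have hdead : ¬ pyGet2 dp cur tn = some (-1) := by rw [hv]; simp [hval]
    rw [dead_start n throws dp tn cur hdead k]
    simp

-- ===== VERDICT (by name: the statement is the Claim_ definition above) =====
theorem dfs_spec : Claim_equal_dfs := by
  intro n m tn cur throws dp _hDom hPre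
  unfold Spec_dfs
  rcases hPre with ⟨hsome, hcase⟩ | hPre
  · -- the search stops at its first lines: marked start, or start at the last level
    obtain ⟨v, hv⟩ := Option.isSome_iff_exists.mp hsome
    rw [hv, Option.getD_some] at hcase
    by_cases hvm : v = -1
    · subst hvm
      have htnm : tn = m := by
        rcases hcase with h | h
        · simp at h
        · exact h
      have hA : dfs n m tn cur throws dp = 1 := by
        unfold dfs
        rw [show (m - tn).toNat = 0 from by omega]
        conv_lhs => rw [dfsAux]
        rw [hv]
        simp [htnm]
      have hB : dfs_alt n m tn cur throws dp = 1 := by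
        unfold dfs_alt
        rw [hv]
        dsimp only
        rw [if_neg (by simp), PySem.List.pyRange_one_eq_nil (by omega), List.foldl_nil,
          PySem.Set.ofList_eq_self_of_nodup [cur] (List.nodup_singleton cur), List.foldl_cons,
          List.foldl_nil, if_pos (show pyGet2 dp cur m = some (-1) from htnm ▸ hv)]
        norm_num
      rw [hA, hB]
    · have hA : dfs n m tn cur throws dp = 0 := by
        unfold dfs
        conv_lhs => rw [dfsAux.eq_def]
        rw [hv]
        simp [hvm]
      have hB : dfs_alt n m tn cur throws dp = 0 := by
        unfold dfs_alt
        rw [hv]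
        dsimp only
        rw [if_pos (by simp [hvm])]
      rw [hA, hB]
  obtain ⟨hn, htn0, htnm, hc0, hcn, hdl, hrow, htl, hthr⟩ := hPre
  have hSh : ShapeOK n m dp := ⟨hdl, hrow⟩
  have hTOK : ThrowsOK m throws := by
    intro t ht0 htm
    have hlen : t.toNat < throws.length := by omega
    refine ⟨throws[t.toNat], ?_, ?_⟩
    · rw [PySem.List.pyGet?_of_nonneg _ ht0, List.getElem?_eq_getElem hlen]
    · have h1 : t.toNat < (throws.take m.toNat).length := by
        rw [List.length_take]
        omega
      have h2 : (throws.take m.toNat)[t.toNat] = throws[t.toNat] := List.getElem_take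
      exact h2 ▸ hthr _ (List.getElem_mem h1)
  have hk : tn + (((m - tn).toNat : Nat) : Int) = m := by omega
  obtain ⟨hcount, _, _⟩ := dfsAux_char n m throws hn hTOK (m - tn).toNat tn cur dp hSh htn0 hk hc0 hcn
  obtain ⟨v, hv⟩ := pyGet2_some_of_inrange n m dp hSh cur tn hc0 hcn htn0 htnm
  show dfs n m tn cur throws dp = dfs_alt n m tn cur throws dp
  unfold dfs
  rw [hcount, dfs_alt_char n m tn cur throws dp (m - tn).toNat hk v hv]
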